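-- pv_equiv track=rewrite | github.com/irfanzq/netbox-automation-plugin | netbox_automation_plugin/sync/reconciliation/apply_cells.py | _cells_indicate_vyos
-- ===== SOURCE A (Python) =====
-- def _cell(cells: dict[str, str], *names: str) -> str:
--     for n in names:
--         for k, v in cells.items():
--             if str(k).strip().lower() == str(n).strip().lower():
--                 return "" if v is None else str(v).strip()
--     for n in names:
--         key_l = str(n).strip().lower()
--         for k, v in cells.items():
--             if str(k).strip().lower() == key_l:
--                 return "" if v is None else str(v).strip()
--     return ""
--
-- def _cells_indicate_vyos(hostname: str, cells: dict[str, str]) -> bool: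
--     """True when hostname or common MAAS/OS columns suggest VyOS (router role must be chosen manually)."""
--     hn = (hostname or "").strip().lower()
--     if "vyos" in hn:
--         return True
--     blob = " ".join(
--         _cell(cells, h)
--         for h in (
--             "NB proposed platform",
--             "OS provision",
--             "OS release",
--             "MAAS OS",
--             "OS",
--             "MAAS status",
--         )
--     ).lower()
--     return "vyos" in blob
-- ===== SOURCE B (Python) =====
-- def _cells_indicate_vyos(hostname: str, cells: dict[str, str]) -> bool:
--     hn = (hostname or "").strip().lower()
--     if "vyos" in hn:
--         return True
--     idx = {}
--     for k, v in cells.items():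
--         idx.setdefault(str(k).strip().lower(), "" if v is None else str(v).strip())
--     return any(
--         "vyos" in idx.get(h.strip().lower(), "").lower()
--         for h in (
--             "NB proposed platform",
--             "OS provision",
--             "OS release",
--             "MAAS OS",
--             "OS",
--             "MAAS status",
--         )
--     )
-- ===== Notes on version B (the rewrite author's own statement) =====
-- stated objective: faster
-- what changed: Replaces the repeated-scan _cell helper (two linear scans of cells per header) and the space-joined blob with one normalized first-key-wins index built in a single pass over cells, plus an any() over six constant-time lookups.
import Mathlib
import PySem

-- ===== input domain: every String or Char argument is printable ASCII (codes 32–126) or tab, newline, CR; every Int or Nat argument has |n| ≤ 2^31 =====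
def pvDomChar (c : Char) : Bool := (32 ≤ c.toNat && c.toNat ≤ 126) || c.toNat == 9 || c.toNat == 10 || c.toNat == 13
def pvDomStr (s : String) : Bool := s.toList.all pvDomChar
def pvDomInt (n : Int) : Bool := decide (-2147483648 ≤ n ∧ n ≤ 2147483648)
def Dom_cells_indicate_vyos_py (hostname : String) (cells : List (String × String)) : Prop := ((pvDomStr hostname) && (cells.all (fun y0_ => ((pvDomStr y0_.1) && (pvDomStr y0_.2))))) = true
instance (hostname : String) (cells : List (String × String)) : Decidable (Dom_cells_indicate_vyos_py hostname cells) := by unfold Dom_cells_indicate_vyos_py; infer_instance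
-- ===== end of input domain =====

-- B replaces A's repeated-scan _cell helper and space-joined blob by one normalized
-- first-key-wins index built in a single pass over cells plus an any() over six lookups
-- (objective: faster; a timing run measured B faster on the generated inputs).

-- ===== PORT A =====

-- str(k).strip().lower() / str(n).strip().lower()
def pvNorm (s : String) : String := PySem.Str.lower (PySem.Str.strip s)

-- the six header names A joins over
def pvHeaders : List String :=
  ["NB proposed platform", "OS provision", "OS release", "MAAS OS", "OS", "MAAS status"]

-- _cell: two identical scan passes (each an early-return double loop), else ""
-- (cells : dict[str,str], so v is a str and the 'v is None' branch never fires; str(v) = v)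
def pvCellA (cells : List (String × String)) (names : List String) : String :=
  match names.findSome? (fun n =>
      cells.findSome? (fun kv =>
        if pvNorm kv.1 == pvNorm n then some (PySem.Str.strip kv.2) else none)) with
  | some r => r
  | none =>
    match names.findSome? (fun n =>
        let keyL := pvNorm n
        cells.findSome? (fun kv =>
          if pvNorm kv.1 == keyL then some (PySem.Str.strip kv.2) else none)) with
    | some r => r
    | none => ""

def cells_indicate_vyos_py (hostname : String) (cells : List (String × String)) : Bool :=
  let hn := pvNorm hostname  -- (hostname or "") = hostname for strings
  if PySem.Str.isIn "vyos" hn then true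
  else
    let blob := PySem.Str.lower
      (PySem.Str.join " " (pvHeaders.map (fun h => pvCellA cells [h])))
    PySem.Str.isIn "vyos" blob

-- ===== PORT B =====

-- single pass over cells: normalized key -> stripped value, first key wins (setdefault)
def pvBuildIdx (cells : List (String × String)) : PySem.Dict String String :=
  cells.foldl (fun d kv => PySem.Dict.setdefault d (pvNorm kv.1) (PySem.Str.strip kv.2))
    PySem.Dict.empty

def cells_indicate_vyos_py_alt (hostname : String) (cells : List (String × String)) : Bool :=
  let hn := pvNorm hostname
  if PySem.Str.isIn "vyos" hn then true
  else
    let idx := pvBuildIdx cells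
    pvHeaders.any (fun h =>
      PySem.Str.isIn "vyos" (PySem.Str.lower (PySem.Dict.getD idx (pvNorm h) "")))

-- ===== PRECONDITION & SPEC =====
def Spec_cells_indicate_vyos_py (hostname : String) (cells : List (String × String)) (out : Bool) : Prop := out = cells_indicate_vyos_py_alt hostname cells
instance (hostname : String) (cells : List (String × String)) (out : Bool) : Decidable (Spec_cells_indicate_vyos_py hostname cells out) := by unfold Spec_cells_indicate_vyos_py; infer_instance

-- ===== CLAIM (what is proved, stated in full; the proofs are below) =====
def Claim_equal_cells_indicate_vyos_py : Prop := ∀ (hostname : String) (cells : List (String × String)), Dom_cells_indicate_vyos_py hostname cells → Spec_cells_indicate_vyos_py hostname cells (cells_indicate_vyos_py hostname cells)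

-- ===== LEMMAS AND PROOFS =====

-- get? after setdefault: the old binding wins, a new key is appended
theorem pvGet?_setdefault (d : PySem.Dict String String) (k v q : String) :
    (PySem.Dict.setdefault d k v).get? q
      = (d.get? q).or (if k == q then some v else none) := by
  simp only [PySem.Dict.setdefault]
  by_cases hc : d.contains k = true
  · simp only [hc, if_true]
    by_cases hk : (k == q) = true
    · have hkq : k = q := eq_of_beq hk
      subst hkq
      rcases ho : d.get? k with _ | v'
      · exfalso
        simp only [PySem.Dict.contains, List.any_eq_true] at hc
        simp only [PySem.Dict.get?, Option.map_eq_none_iff, List.find?_eq_none] at ho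
        obtain ⟨p, hp, hb⟩ := hc
        exact absurd hb (by simpa using ho p hp)
      · simp
    · simp [hk]
  · rw [if_neg hc]
    simp only [PySem.Dict.get?]
    rw [List.find?_append]
    rcases hf : List.find? (fun p => p.1 == q) d.items with _ | p
    · by_cases hk : (k == q) = true
      · simp [List.find?, hk, hf]
      · simp [List.find?, hk, hf]
    · simp [hf]

-- the index built by first-key-wins setdefault looks up the FIRST matching cell
theorem pvGet?_buildIdx_aux (cells : List (String × String)) (d : PySem.Dict String String) (q : String) :
    PySem.Dict.get? (cells.foldl (fun d kv => PySem.Dict.setdefault d (pvNorm kv.1) (PySem.Str.strip kv.2)) d) q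
      = (PySem.Dict.get? d q).or
          (cells.findSome? (fun kv =>
            if pvNorm kv.1 == q then some (PySem.Str.strip kv.2) else none)) := by
  induction cells generalizing d with
  | nil => simp
  | cons kv rest ih =>
      simp only [List.foldl_cons, List.findSome?_cons, ih, pvGet?_setdefault]
      by_cases hk : (pvNorm kv.1 == q) = true
      · simp [eq_of_beq hk]
      · simp [hk]

theorem pvCell_eq_lookup (cells : List (String × String)) (h : String) :
    pvCellA cells [h] = PySem.Dict.getD (pvBuildIdx cells) (pvNorm h) "" := by
  have hidx : PySem.Dict.get? (pvBuildIdx cells) (pvNorm h)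
      = cells.findSome? (fun kv =>
          if pvNorm kv.1 == pvNorm h then some (PySem.Str.strip kv.2) else none) := by
    rw [pvBuildIdx, pvGet?_buildIdx_aux]
    simp [PySem.Dict.empty, PySem.Dict.get?]
  cases hF : cells.findSome? (fun kv =>
      if pvNorm kv.1 == pvNorm h then some (PySem.Str.strip kv.2) else none) with
  | none =>
      simp only [pvCellA, List.findSome?_cons, PySem.Dict.getD, hidx, hF]
      rfl
  | some r =>
      simp only [pvCellA, List.findSome?_cons, PySem.Dict.getD, hidx, hF]
      rfl

-- lowering maps over a space-join
theorem pvLower_intercalate (ls : List (List Char)) :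
    PySem.Chars.lower (List.intercalate [' '] ls)
      = List.intercalate [' '] (ls.map PySem.Chars.lower) := by
  induction ls with
  | nil => simp [List.intercalate, PySem.Chars.lower]
  | cons a t ih =>
      cases t with
      | nil => simp [List.intercalate, PySem.Chars.lower]
      | cons b t' =>
          have hc : ∀ (s a b : List Char) (t : List (List Char)),
              s.intercalate (a :: b :: t) = a ++ s ++ s.intercalate (b :: t) := by
            intro s a b t; simp [List.intercalate, List.intersperse]
          calc PySem.Chars.lower ([' '].intercalate (a :: b :: t'))
              = PySem.Chars.lower (a ++ [' '] ++ [' '].intercalate (b :: t')) := by rw [hc]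
            _ = PySem.Chars.lower a ++ [' '] ++ PySem.Chars.lower ([' '].intercalate (b :: t')) := by
                  simp [PySem.Chars.lower, show PySem.Chars.lowerChar ' ' = ' ' from by decide]
            _ = PySem.Chars.lower a ++ [' '] ++ [' '].intercalate (List.map PySem.Chars.lower (b :: t')) := by
                  rw [ih]
            _ = [' '].intercalate (List.map PySem.Chars.lower (a :: b :: t')) := by
                  rw [List.map_cons, List.map_cons, List.map_cons, hc]

-- a space-free nonempty pattern that is a prefix of a ++ ' ' :: b is a prefix of a
theorem pvPrefix_no_space (p : List Char) (hs : ' ' ∉ p) :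
    ∀ (a b : List Char), p <+: a ++ ' ' :: b → p <+: a := by
  induction p with
  | nil => intro a b _; exact List.nil_prefix
  | cons c p' ih =>
      intro a b hp
      cases a with
      | nil =>
          exfalso
          obtain ⟨t, ht⟩ := hp
          simp at ht
          exact hs (by simp [ht.1])
      | cons x a' =>
          obtain ⟨t, ht⟩ := hp
          simp only [List.cons_append, List.cons.injEq] at ht
          obtain ⟨rfl, ht2⟩ := ht
          have : p' <+: a' ++ ' ' :: b := ⟨t, ht2⟩
          have := ih (fun hm => hs (List.mem_cons_of_mem _ hm)) a' b this
          exact (List.cons_prefix_cons).mpr ⟨rfl, this⟩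

-- occurrences of a space-free nonempty pattern split at a separating space
theorem pvInfix_split (p : List Char) (hne : p ≠ []) (hs : ' ' ∉ p) :
    ∀ (a b : List Char), (p <:+: a ++ ' ' :: b ↔ p <:+: a ∨ p <:+: b) := by
  intro a
  induction a with
  | nil =>
      intro b
      simp only [List.nil_append]
      rw [List.infix_cons_iff]
      constructor
      · rintro (hp | hi)
        · exfalso
          cases p with
          | nil => exact hne rfl
          | cons c p' =>
              obtain ⟨t, ht⟩ := hp
              simp only [List.cons_append, List.cons.injEq] at ht
              exact hs (by simp [ht.1])
        · exact Or.inr hi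
      · rintro (hi | hi)
        · exact absurd (List.eq_nil_of_infix_nil hi) hne
        · exact Or.inr hi
  | cons x a' ih =>
      intro b
      rw [List.cons_append, List.infix_cons_iff, List.infix_cons_iff, ih b]
      constructor
      · rintro (hp | hi | hi)
        · exact Or.inl (Or.inl (pvPrefix_no_space p hs (x :: a') b hp))
        · exact Or.inl (Or.inr hi)
        · exact Or.inr hi
      · rintro ((hp | hi) | hi)
        · exact Or.inl (hp.trans (List.prefix_append _ _))
        · exact Or.inr (Or.inl hi)
        · exact Or.inr (Or.inr hi)

-- 'vyos' in the lowered space-join  =  'vyos' in some lowered part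
theorem pvIsIn_join (parts : List String) :
    PySem.Str.isIn "vyos" (PySem.Str.lower (PySem.Str.join " " parts))
      = parts.any (fun s => PySem.Str.isIn "vyos" (PySem.Str.lower s)) := by
  rw [Bool.eq_iff_iff, PySem.Str.isIn_iff_infix, List.any_eq_true]
  have hsep : (" ").toList = [' '] := by decide
  rw [PySem.Str.toList_lower]
  simp only [PySem.Str.join, PySem.Chars.join, hsep]
  have htl : (String.ofList ([' '].intercalate (parts.map String.toList))).toList
      = [' '].intercalate (parts.map String.toList) := by simp
  rw [htl, pvLower_intercalate, List.map_map]
  have hvy : ("vyos").toList ≠ [] := by decide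
  have hvs : ' ' ∉ ("vyos").toList := by decide
  have key : ∀ (ls : List (List Char)),
      ("vyos").toList <:+: [' '].intercalate ls ↔ ∃ l ∈ ls, ("vyos").toList <:+: l := by
    intro ls
    induction ls with
    | nil =>
        have h0 : ([' '] : List Char).intercalate [] = [] := by simp [List.intercalate]
        rw [h0]
        constructor
        · intro hi; exact absurd (List.eq_nil_of_infix_nil hi) hvy
        · rintro ⟨l, hl, _⟩; simp at hl
    | cons a t ih =>
        cases t with
        | nil => simp [List.intercalate]
        | cons b t' =>
            have hc : [' '].intercalate (a :: b :: t') = a ++ [' '] ++ [' '].intercalate (b :: t') := by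
              simp [List.intercalate, List.intersperse]
            rw [hc, List.append_assoc, List.singleton_append,
              pvInfix_split _ hvy hvs, ih]
            simp only [List.mem_cons]
            constructor
            · rintro (h | ⟨l, hl, h⟩)
              · exact ⟨a, Or.inl rfl, h⟩
              · exact ⟨l, Or.inr hl, h⟩
            · rintro ⟨l, (rfl | hl), h⟩
              · exact Or.inl h
              · exact Or.inr ⟨l, hl, h⟩
  rw [key]
  constructor
  · rintro ⟨l, hl, h⟩
    simp only [List.mem_map, Function.comp] at hl
    obtain ⟨s, hs', rfl⟩ := hl
    exact ⟨s, hs', by rw [PySem.Str.isIn_iff_infix, PySem.Str.toList_lower]; exact h⟩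
  · rintro ⟨s, hs', h⟩
    refine ⟨PySem.Chars.lower s.toList, List.mem_map.mpr ⟨s, hs', rfl⟩, ?_⟩
    rw [PySem.Str.isIn_iff_infix, PySem.Str.toList_lower] at h
    exact h

-- ===== VERDICT (by name: the statement is the Claim_ definition above) =====
theorem cells_indicate_vyos_py_spec : Claim_equal_cells_indicate_vyos_py := by
  intro hostname cells _
  unfold Spec_cells_indicate_vyos_py
  simp only [cells_indicate_vyos_py, cells_indicate_vyos_py_alt]
  by_cases h : PySem.Str.isIn "vyos" (pvNorm hostname) = true
  · rw [if_pos h, if_pos h]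
  · rw [if_neg h, if_neg h]
    rw [pvIsIn_join, List.any_map]
    apply PySem.List.any_congr_mem
    intro h' _
    simp only [Function.comp_apply]
    rw [pvCell_eq_lookup]
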